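-- pv_equiv track=rewrite | github.com/greysondn/gamesolutions | mattparkermp/20200325_spin_the_table/toolkit.py | getMaxArrangement
-- ===== SOURCE A (Python) =====
-- def rotForwards(someList):
--     ret = []
--     ret.append(someList[-1])
--     for i in range(len(someList)-1):
--         ret.append(someList[i])
--     return ret
--
-- def getMaxArrangement(table, people):
--     ret = None
--     retArrangement = table.copy()
--     retPeople      = people.copy()
--     retCount       = countMatches(table, people)
--
--     curPeople = people.copy()
--
--     for i in range(len(table)):
--         curPeople = rotForwards(curPeople)
--         curCount  = countMatches(table, curPeople)
--
--         if (curCount > retCount):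
--             retCount  = curCount
--             retPeople = curPeople.copy()
--
--     ret = (retArrangement, retPeople, retCount)
--     return ret
--
-- def countMatches(table, people):
--     # a running count of matches
--     ret = 0
--
--     for i in range(len(table)):
--         if (table[i] == people[i]):
--             ret += 1
--
--     return ret
-- ===== SOURCE B (Python) =====
-- def getMaxArrangement(table, people):
--     # Tally per rotation offset: index each value's positions in people once; each
--     # match (j, k) contributes to rotation offset (j - k) % m. Then pick the
--     # earliest offset r in 0..len(table) that strictly beats the baseline.
--     n, m = len(table), len(people)
--     if m == 0:
--         return (table.copy(), [], 0)
--     pos = {}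
--     for k, v in enumerate(people):
--         pos.setdefault(v, []).append(k)
--     counts = {}
--     for j, v in enumerate(table):
--         for k in pos.get(v, []):
--             s = (j - k) % m
--             counts[s] = counts.get(s, 0) + 1
--     best = 0
--     for r in range(1, n + 1):
--         if counts.get(r % m, 0) > counts.get(best % m, 0):
--             best = r
--     s = best % m
--     return (table.copy(), people[m - s:] + people[:m - s], counts.get(s, 0))
-- ===== Notes on version B (the rewrite author's own statement) =====
-- stated objective: alternative
-- what changed: Instead of materialising every rotation and re-counting matches, B indexes each value's positions in people once and tallies, for every matching pair (table position j, people position k), the rotation offset (j-k) mod m in a dict, then scans offsets 0..n for the earliest strict maximum and builds the winning rotation by slicing.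
import Mathlib
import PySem

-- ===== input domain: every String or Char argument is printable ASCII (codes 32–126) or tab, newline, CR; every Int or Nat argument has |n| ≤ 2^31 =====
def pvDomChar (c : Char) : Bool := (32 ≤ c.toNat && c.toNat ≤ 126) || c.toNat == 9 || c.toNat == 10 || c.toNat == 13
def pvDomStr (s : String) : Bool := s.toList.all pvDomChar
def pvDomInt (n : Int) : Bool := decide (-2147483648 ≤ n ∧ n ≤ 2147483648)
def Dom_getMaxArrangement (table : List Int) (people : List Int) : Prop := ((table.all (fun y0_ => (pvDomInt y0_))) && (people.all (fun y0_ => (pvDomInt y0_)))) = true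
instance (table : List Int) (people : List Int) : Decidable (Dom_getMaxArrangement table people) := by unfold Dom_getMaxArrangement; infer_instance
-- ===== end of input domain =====

-- B replaces A's try-every-rotation-and-recount search by a single tally of match counts per
-- rotation offset (value-position index + dict counter), then one argmax scan — a different
-- algorithm of comparable cost. Return-value equivalence on Pre_ (len(people) >= len(table)).


-- ===== PORT A =====
-- rotForwards: ret = [someList[-1]]; for i in range(len(someList)-1): ret.append(someList[i])
-- someList[-1] raises IndexError on []; the `.getD 0` default is only reached outside Pre_.
def pvRotForwards (someList : List Int) : List Int :=
  let ret : List Int := [] ++ [(PySem.List.pyGet? someList (-1)).getD 0]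
  (PySem.List.pyRange 0 ((someList.length : Int) - 1)).foldl
    (fun ret i => ret ++ [(PySem.List.pyGet? someList i).getD 0]) ret

-- countMatches: people[i] raises IndexError when len(people) < len(table); `.getD 0` only reached outside Pre_.
def pvCountMatches (table : List Int) (people : List Int) : Int :=
  (PySem.List.pyRange 0 (table.length : Int)).foldl
    (fun ret i =>
      if (PySem.List.pyGet? table i).getD 0 == (PySem.List.pyGet? people i).getD 0 then
        ret + 1
      else ret)
    0

def getMaxArrangement (table : List Int) (people : List Int) : List Int × List Int × Int :=
  let retArrangement := table
  let retPeople := people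
  let retCount := pvCountMatches table people
  let curPeople := people
  let st :=
    (PySem.List.pyRange 0 (table.length : Int)).foldl
      (fun (s : List Int × List Int × Int) _ =>
        let curPeople := pvRotForwards s.2.1
        let curCount := pvCountMatches table curPeople
        if curCount > s.2.2 then (curPeople, curPeople, curCount)
        else (s.1, curPeople, s.2.2))
      (retPeople, curPeople, retCount)
  (retArrangement, st.1, st.2.2)

-- ===== PORT B =====
def getMaxArrangement_alt (table : List Int) (people : List Int) : List Int × List Int × Int :=
  let n : Int := (table.length : Int)
  let m : Int := (people.length : Int)
  if m == 0 then (table, [], 0) else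
  -- pos: value -> its positions in people; pos.setdefault(v, []).append(k) is Dict.modify v [] (· ++ [k])
  let pos : PySem.Dict Int (List Int) :=
    (PySem.List.enumerate people).foldl
      (fun d kv => d.modify kv.2 [] (fun l => l ++ [kv.1])) PySem.Dict.empty
  -- counts: rotation offset (j - k) % m -> number of matches it realises
  let counts : PySem.Dict Int Int :=
    (PySem.List.enumerate table).foldl
      (fun d jv =>
        (pos.getD jv.2 []).foldl
          (fun d k =>
            let s := PySem.Int.mod (jv.1 - k) m
            d.insert s (d.getD s 0 + 1))
          d)
      PySem.Dict.empty
  let best : Int :=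
    (PySem.List.pyRange 1 (n + 1)).foldl
      (fun best r =>
        if counts.getD (PySem.Int.mod r m) 0 > counts.getD (PySem.Int.mod best m) 0 then r
        else best)
      0
  let s := PySem.Int.mod best m
  (table,
   PySem.List.slice people (some (m - s)) none ++ PySem.List.slice people none (some (m - s)),
   counts.getD s 0)

-- ===== PRECONDITION & SPEC =====
-- A raises IndexError (people[i] in countMatches, or someList[-1] on an empty rotation) exactly
-- when len(people) < len(table); Pre_ excludes only those inputs.
def Pre_getMaxArrangement (table : List Int) (people : List Int) : Prop :=
  table.length ≤ people.length
instance (table : List Int) (people : List Int) : Decidable (Pre_getMaxArrangement table people) := by unfold Pre_getMaxArrangement; infer_instance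

def pvWitness_getMaxArrangement : List Int × List Int := ([1, 2, 3], [3, 1, 2])

def Spec_getMaxArrangement (table : List Int) (people : List Int) (out : List Int × List Int × Int) : Prop := out = getMaxArrangement_alt table people
instance (table : List Int) (people : List Int) (out : List Int × List Int × Int) : Decidable (Spec_getMaxArrangement table people out) := by unfold Spec_getMaxArrangement; infer_instance

-- ===== CLAIM (what is proved, stated in full; the proofs are below) =====
def Claim_equal_getMaxArrangement : Prop := ∀ (table : List Int) (people : List Int), Dom_getMaxArrangement table people → Pre_getMaxArrangement table people → Spec_getMaxArrangement table people (getMaxArrangement table people)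

-- ===== LEMMAS AND PROOFS =====

-- the "best rotation so far" recurrence both selection loops compute, abstracted over the score φ
def pvBest (φ : Nat → Int) : Nat → Nat
  | 0 => 0
  | k + 1 => if φ (k + 1) > φ (pvBest φ k) then k + 1 else pvBest φ k

-- A's score of rotation x
def pvF (table people : List Int) (x : Nat) : Int :=
  pvCountMatches table (pvRotForwards^[x] people)

theorem pvBest_congr (φ ψ : Nat → Int) (h : ∀ x, φ x = ψ x) (k : Nat) :
    pvBest φ k = pvBest ψ k := by
  induction k with
  | zero => rfl
  | succ k ih => simp [pvBest, ih, h]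

-- A's main loop, characterised
theorem pvA_loop (table people : List Int) (k : Nat) :
    (PySem.List.pyRange 0 (k : Int)).foldl
      (fun (s : List Int × List Int × Int) _ =>
        let curPeople := pvRotForwards s.2.1
        let curCount := pvCountMatches table curPeople
        if curCount > s.2.2 then (curPeople, curPeople, curCount)
        else (s.1, curPeople, s.2.2))
      (people, people, pvCountMatches table people) =
    (pvRotForwards^[pvBest (pvF table people) k] people,
     pvRotForwards^[k] people,
     pvF table people (pvBest (pvF table people) k)) := by
  induction k with
  | zero =>
    simp [pvBest, pvF, PySem.List.pyRange]
  | succ k ih =>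
    have h1 : ((k + 1 : Nat) : Int) = (k : Int) + 1 := by push_cast; ring
    rw [h1, PySem.List.pyRange_one_succ_right (by omega), List.foldl_append, ih]
    simp only [List.foldl]
    have hF : pvCountMatches table (pvRotForwards (pvRotForwards^[k] people)) = pvF table people (k + 1) := by
      rw [pvF, Function.iterate_succ_apply']
    simp only [hF]
    by_cases hc : pvF table people (k + 1) > pvF table people (pvBest (pvF table people) k)
    · rw [if_pos hc, show pvBest (pvF table people) (k + 1) = k + 1 from by simp [pvBest, hc],
        Function.iterate_succ_apply']
    · rw [if_neg hc, show pvBest (pvF table people) (k + 1) = pvBest (pvF table people) k from by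
        simp [pvBest]; omega, Function.iterate_succ_apply']

-- B's selection loop, characterised (for any score g over Int)
theorem pvB_loop (g : Int → Int) (k : Nat) :
    (PySem.List.pyRange 1 ((k : Int) + 1)).foldl
      (fun best r => if g r > g best then r else best) 0 =
    ((pvBest (fun x => g (x : Int)) k : Nat) : Int) := by
  induction k with
  | zero => rfl
  | succ k ih =>
    have h1 : (((k + 1 : Nat) : Int) + 1) = ((k : Int) + 1) + 1 := by push_cast; ring
    rw [h1, PySem.List.pyRange_one_succ_right (by omega), List.foldl_append, ih]
    have h2 : ((k : Int) + 1) = ((k + 1 : Nat) : Int) := by push_cast; ring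
    simp only [List.foldl, h2]
    simp [pvBest]

-- enumerate, in closed form
theorem pvEnumerate_eq (xs : List Int) (s : Int) :
    PySem.List.enumerate xs s =
      (List.range xs.length).map (fun k : Nat => (s + (k : Int), xs.getD k 0)) := by
  induction xs generalizing s with
  | nil => rfl
  | cons x t ih =>
    simp only [PySem.List.enumerate, List.length_cons, List.range_succ_eq_map, List.map_cons,
      List.map_map, ih (s + 1)]
    refine List.cons_eq_cons.mpr ⟨by simp, ?_⟩
    apply List.map_congr_left
    intro k _
    simp [Function.comp]
    ring

-- one rotForwards is a right rotation
theorem pvRotForwards_eq (l : List Int) (h : l ≠ []) :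
    pvRotForwards l = l.rotate (l.length - 1) := by
  have hlen : 1 ≤ l.length := List.length_pos_of_ne_nil h
  unfold pvRotForwards
  rw [PySem.List.foldl_append_singleton_eq_map]
  have h1 : ((l.length : Int) - 1) = ((l.length - 1 : Nat) : Int) := by omega
  rw [h1, PySem.List.pyRange_zero_natCast, List.map_map]
  have hhead : (PySem.List.pyGet? l (-1)).getD 0 = l.getLast h := by
    simp only [PySem.List.pyGet?, PySem.List.pyIdx?]
    rw [if_neg (by omega : ¬ ((0:Int) ≤ -1)), if_pos (by omega : -(l.length : Int) ≤ -1)]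
    simp only [Option.bind_some]
    rw [List.getLast_eq_getElem]
    have hn : l.length - (-(-1:Int)).toNat = l.length - 1 := by norm_num
    rw [hn, List.getElem?_eq_getElem (by omega)]
    rfl
  have htail : List.map ((fun i => (PySem.List.pyGet? l i).getD 0) ∘ (fun k : Nat => (k : Int)))
      (List.range (l.length - 1)) = l.dropLast := by
    apply List.ext_getElem
    · simp [List.length_dropLast]
    · intro i hi1 hi2
      simp only [List.getElem_map, List.getElem_range, Function.comp]
      rw [List.getElem_dropLast]
      have hil : i < l.length := by simp at hi1; omega
      have hb := PySem.List.pyGetD_eq_getElem l (0:Int) (i := (i : Int)) (by omega) (by exact_mod_cast hil)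
      simp only [PySem.List.pyGetD] at hb
      rw [hb]
      simp
  rw [hhead, htail]
  rw [List.rotate_eq_drop_append_take (by omega)]
  rw [List.drop_length_sub_one h, List.dropLast_eq_take]
  rfl

-- x rotForwards
theorem pvRotIter_eq (people : List Int) (h : people ≠ []) (x : Nat) :
    pvRotForwards^[x] people = people.rotate (x * (people.length - 1)) := by
  induction x with
  | zero => simp
  | succ x ih =>
    rw [Function.iterate_succ_apply', ih]
    have hne : people.rotate (x * (people.length - 1)) ≠ [] := by
      intro hc
      exact h (by simpa using congrArg List.length hc)
    rw [pvRotForwards_eq _ hne, List.length_rotate, List.rotate_rotate]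
    congr 1
    ring

-- countMatches, in closed form
theorem pvCountMatches_eq (table cur : List Int) :
    pvCountMatches table cur =
      ((List.range table.length).countP
        (fun j => table.getD j 0 == cur.getD j 0) : Int) := by
  unfold pvCountMatches
  rw [PySem.List.pyRange_zero_natCast, List.foldl_map]
  have h := PySem.List.foldl_count_if
    (fun j : Nat => (PySem.List.pyGet? table (j : Int)).getD 0 == (PySem.List.pyGet? cur (j : Int)).getD 0)
    (List.range table.length) 0
  simp only at h
  rw [h]
  have hfun : (fun j : Nat => (PySem.List.pyGet? table (j : Int)).getD 0 == (PySem.List.pyGet? cur (j : Int)).getD 0)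
      = (fun j : Nat => table.getD j 0 == cur.getD j 0) := by
    funext j
    have h1 := PySem.List.pyGetD_natCast table j (0 : Int)
    have h2 := PySem.List.pyGetD_natCast cur j (0 : Int)
    simp only [PySem.List.pyGetD] at h1 h2
    rw [h1, h2]
  rw [hfun]
  simp

-- the position dictionary, looked up
theorem pvPos_eq (people : List Int) (v : Int) :
    ((PySem.List.enumerate people).foldl
        (fun d kv => d.modify kv.2 [] (fun l => l ++ [kv.1])) PySem.Dict.empty).getD v [] =
      ((List.range people.length).filter (fun k => people.getD k 0 == v)).map
        (fun k : Nat => (k : Int)) := by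
  rw [pvEnumerate_eq, List.foldl_map]
  have hstep : (List.range people.length).foldl
      (fun (d : PySem.Dict Int (List Int)) (k : Nat) =>
        d.modify (people.getD k 0) [] (fun l => l ++ [(0 : Int) + (k : Int)])) PySem.Dict.empty
      = ((List.range people.length).map
          (fun k : Nat => (people.getD k 0, (0 : Int) + (k : Int)))).foldl
          (fun d p => d.modify p.1 [] (fun l => l ++ [p.2])) PySem.Dict.empty := by
    rw [List.foldl_map]
  rw [hstep, PySem.Dict.getD_foldl_modify_append, List.filter_map, List.map_map]
  simp only [Function.comp_def, zero_add]
  rfl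

-- countP of a predicate that can only hold at k0, over a Nodup list
theorem pvCountP_unique {l : List Nat} (hnd : l.Nodup) (k0 : Nat) (p : Nat → Bool)
    (hp : ∀ k ∈ l, p k = true → k = k0) :
    l.countP p = if k0 ∈ l ∧ p k0 = true then 1 else 0 := by
  induction l with
  | nil => simp
  | cons a l ih =>
    rcases List.nodup_cons.mp hnd with ⟨ha, hnd'⟩
    by_cases hpa : p a = true
    · have hak : a = k0 := hp a List.mem_cons_self hpa
      subst hak
      have hz : l.countP p = 0 := by
        rw [List.countP_eq_zero]
        intro b hb hpb
        exact ha ((hp b (List.mem_cons_of_mem _ hb) hpb) ▸ hb)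
      simp [hpa, hz]
    · rw [List.countP_cons, ih hnd' (fun k hk hpk => hp k (List.mem_cons_of_mem _ hk) hpk)]
      by_cases hk : k0 = a
      · subst hk
        simp [hpa, List.mem_cons]
      · simp [List.mem_cons, hk, hpa]

-- membership of the unique preimage: the offset of (j, k) is s iff k is s's partner position
theorem pvModIff (m : Nat) (hm : 0 < m) (j k : Nat) (s : Int) (hs0 : 0 ≤ s)
    (hsm : s < (m : Int)) (hk : k < m) :
    (PySem.Int.mod ((j : Int) - (k : Int)) (m : Int) = s) ↔
      k = (PySem.Int.mod ((j : Int) - s) (m : Int)).toNat := by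
  have hmpos : (0 : Int) < (m : Int) := by exact_mod_cast hm
  rw [PySem.Int.mod_eq_emod_of_pos hmpos, PySem.Int.mod_eq_emod_of_pos hmpos]
  constructor
  · intro h
    subst h
    have key : ((j : Int) - ((j : Int) - (k : Int)) % (m : Int)) % (m : Int) = (k : Int) := by
      have h2 : ((j : Int) - ((j : Int) - (k : Int)) % (m : Int)) % (m : Int) = (k : Int) % (m : Int) := by
        rw [Int.emod_eq_emod_iff_emod_sub_eq_zero]
        have hd : (j : Int) - ((j : Int) - (k : Int)) % (m : Int) - (k : Int) =
            (m : Int) * (((j : Int) - (k : Int)) / (m : Int)) := by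
          rw [Int.emod_def]; ring
        rw [hd]; exact Int.mul_emod_right _ _
      rw [h2, Int.emod_eq_of_lt (by positivity) (by exact_mod_cast hk)]
    rw [key, Int.toNat_natCast]
  · intro h
    subst h
    have ht : (((((j : Int) - s) % (m : Int)).toNat : Nat) : Int) = ((j : Int) - s) % (m : Int) :=
      Int.toNat_of_nonneg (Int.emod_nonneg _ (by omega))
    rw [ht]
    have h2 : ((j : Int) - ((j : Int) - s) % (m : Int)) % (m : Int) = s % (m : Int) := by
      rw [Int.emod_eq_emod_iff_emod_sub_eq_zero]
      have hd : (j : Int) - ((j : Int) - s) % (m : Int) - s =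
          (m : Int) * (((j : Int) - s) / (m : Int)) := by
        rw [Int.emod_def]; ring
      rw [hd]; exact Int.mul_emod_right _ _
    rw [h2, Int.emod_eq_of_lt hs0 hsm]

-- per-position contribution to offset s: 1 if s's partner holds the right value, else 0
theorem pvCountJ (people : List Int) (v s : Int) (j : Nat) (hm : 0 < people.length)
    (hs0 : 0 ≤ s) (hsm : s < (people.length : Int)) :
    List.count s
      ((((List.range people.length).filter (fun k => people.getD k 0 == v)).map
          (fun k : Nat => (k : Int))).map
        (fun k => PySem.Int.mod (((0 : Int) + (j : Int)) - k) (people.length : Int))) =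
      (if people.getD (PySem.Int.mod ((j : Int) - s) (people.length : Int)).toNat 0 == v then 1
       else 0) := by
  set m := people.length with hmdef
  set k0 := (PySem.Int.mod ((j : Int) - s) (m : Int)).toNat with hk0
  have hk0m : k0 < m := by
    have h1 : PySem.Int.mod ((j : Int) - s) (m : Int) < (m : Int) :=
      PySem.Int.mod_lt _ (by exact_mod_cast hm)
    omega
  rw [List.map_map]
  have hc : List.count s
        ((((List.range m).filter (fun k => people.getD k 0 == v)).map
          ((fun k => PySem.Int.mod (((0 : Int) + (j : Int)) - k) (m : Int)) ∘ (fun k : Nat => (k : Int))))) =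
      List.countP
        ((fun x => x == s) ∘ ((fun k => PySem.Int.mod (((0 : Int) + (j : Int)) - k) (m : Int)) ∘ (fun k : Nat => (k : Int))))
        ((List.range m).filter (fun k => people.getD k 0 == v)) := by
    show List.countP (fun x => x == s) _ = _
    rw [List.countP_map]
  rw [hc, List.countP_filter, pvCountP_unique (List.nodup_range) k0]
  · have hmem : k0 ∈ List.range m := List.mem_range.mpr hk0m
    have hfirst : PySem.Int.mod (((0 : Int) + (j : Int)) - (k0 : Int)) (m : Int) = s := by
      rw [zero_add]
      exact (pvModIff m hm j k0 s hs0 hsm hk0m).mpr rfl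
    by_cases hv : people.getD k0 0 == v
    · rw [if_pos ⟨hmem, by
        simp only [Function.comp, Bool.and_eq_true, beq_iff_eq]
        exact ⟨by simpa using hfirst, by simpa using hv⟩⟩, if_pos hv]
    · rw [if_neg (by
        intro hcon
        rcases (Bool.and_eq_true _ _).mp hcon.2 with ⟨_, hB⟩
        exact hv hB), if_neg hv]
  · intro k hkmem hk
    simp only [Function.comp, beq_iff_eq, Bool.and_eq_true] at hk
    rcases hk with ⟨hk1, _⟩
    have hkm : k < m := List.mem_range.mp hkmem
    rw [zero_add] at hk1
    exact (pvModIff m hm j k s hs0 hsm hkm).mp hk1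

-- Nat version of the 0/1-sum = countP identity
theorem pvSumIte (p : Nat → Bool) (l : List Nat) :
    (l.map (fun j => if p j then 1 else 0)).sum = l.countP p := by
  induction l with
  | nil => rfl
  | cons a l ih =>
    by_cases h : p a <;> simp [h, ih, Nat.add_comm]

-- the counts dictionary, looked up: counts.getD s 0 counts the (j, k) matches at offset s
theorem pvCounts_eq (table people : List Int) (s : Int)
    (hm : 0 < people.length) (hs0 : 0 ≤ s) (hsm : s < (people.length : Int)) :
    ((PySem.List.enumerate table).foldl
        (fun d jv =>
          (((PySem.List.enumerate people).foldl
              (fun d kv => d.modify kv.2 [] (fun l => l ++ [kv.1]))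
              PySem.Dict.empty).getD jv.2 []).foldl
            (fun d k =>
              let t := PySem.Int.mod (jv.1 - k) (people.length : Int)
              d.insert t (d.getD t 0 + 1))
            d)
        PySem.Dict.empty).getD s 0 =
      ((List.range table.length).countP
        (fun j : Nat =>
          people.getD (PySem.Int.mod ((j : Int) - s) (people.length : Int)).toNat 0 ==
            table.getD j 0) : Int) := by
  have hfun : (fun (d : PySem.Dict Int Int) (jv : Int × Int) =>
        (((PySem.List.enumerate people).foldl
            (fun d kv => d.modify kv.2 [] (fun l => l ++ [kv.1]))
            PySem.Dict.empty).getD jv.2 []).foldl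
          (fun d k =>
            let t := PySem.Int.mod (jv.1 - k) (people.length : Int)
            d.insert t (d.getD t 0 + 1))
          d)
      = (fun (d : PySem.Dict Int Int) (jv : Int × Int) =>
          ((((PySem.List.enumerate people).foldl
              (fun d kv => d.modify kv.2 [] (fun l => l ++ [kv.1]))
              PySem.Dict.empty).getD jv.2 []).map
            (fun k => PySem.Int.mod (jv.1 - k) (people.length : Int))).foldl
            (fun d x => d.insert x (d.getD x 0 + 1)) d) := by
    funext d jv
    rw [List.foldl_map]
  rw [hfun, ← List.foldl_flatMap, PySem.Dict.getD_foldl_insert_add_one]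
  have he : (PySem.Dict.empty : PySem.Dict Int Int).getD s 0 = 0 := rfl
  rw [he, zero_add]
  have hj : ∀ j ∈ List.range table.length,
      (((List.count s) ∘ (fun jv : Int × Int =>
            ((((PySem.List.enumerate people).foldl
                (fun d kv => d.modify kv.2 [] (fun l => l ++ [kv.1]))
                PySem.Dict.empty).getD jv.2 []).map
              (fun k => PySem.Int.mod (jv.1 - k) (people.length : Int))))) ∘
        (fun j : Nat => ((0 : Int) + (j : Int), table.getD j 0))) j =
      (if people.getD (PySem.Int.mod ((j : Int) - s) (people.length : Int)).toNat 0 ==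
          table.getD j 0 then 1 else 0) := by
    intro j _
    simp only [Function.comp]
    rw [pvPos_eq]
    exact pvCountJ people (table.getD j 0) s j hm hs0 hsm
  have hsum : List.count s
      ((PySem.List.enumerate table).flatMap
        (fun jv =>
          (((PySem.List.enumerate people).foldl
              (fun d kv => d.modify kv.2 [] (fun l => l ++ [kv.1]))
              PySem.Dict.empty).getD jv.2 []).map
            (fun k => PySem.Int.mod (jv.1 - k) (people.length : Int)))) =
      (List.range table.length).countP
        (fun j : Nat =>
          people.getD (PySem.Int.mod ((j : Int) - s) (people.length : Int)).toNat 0 ==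
            table.getD j 0) := by
    rw [List.count_flatMap, pvEnumerate_eq table 0, List.map_map, List.map_congr_left hj]
    exact pvSumIte _ _
  rw [hsum]

-- index bookkeeping: the offset-s partner of position j is where rotation x places people
theorem pvIndex_eq (m j x : Nat) (hm : 0 < m) :
    (PySem.Int.mod ((j : Int) - (PySem.Int.mod (x : Int) (m : Int))) (m : Int)).toNat =
      (j + x * (m - 1)) % m := by
  have hmpos : (0 : Int) < (m : Int) := by exact_mod_cast hm
  rw [PySem.Int.mod_eq_emod_of_pos hmpos, PySem.Int.mod_eq_emod_of_pos hmpos]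
  have h1 : (((j + x * (m - 1)) % m : Nat) : Int) = ((j : Int) + (x : Int) * ((m : Int) - 1)) % (m : Int) := by
    push_cast [Nat.cast_sub (show 1 ≤ m by omega)]
    ring_nf
  have key : ((j : Int) - (x : Int) % (m : Int)) % (m : Int) = (((j + x * (m - 1)) % m : Nat) : Int) := by
    rw [h1, Int.emod_eq_emod_iff_emod_sub_eq_zero]
    have hd : (j : Int) - (x : Int) % (m : Int) - ((j : Int) + (x : Int) * ((m : Int) - 1)) =
        (m : Int) * (((x : Int) / (m : Int)) - (x : Int)) := by
      rw [Int.emod_def]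
      ring
    rw [hd]
    exact Int.mul_emod_right _ _
  rw [key, Int.toNat_natCast]

-- the two scores agree
theorem pvScore_eq (table people : List Int) (hm : 0 < people.length)
    (hpre : table.length ≤ people.length) (x : Nat) :
    ((PySem.List.enumerate table).foldl
        (fun d jv =>
          (((PySem.List.enumerate people).foldl
              (fun d kv => d.modify kv.2 [] (fun l => l ++ [kv.1]))
              PySem.Dict.empty).getD jv.2 []).foldl
            (fun d k =>
              let t := PySem.Int.mod (jv.1 - k) (people.length : Int)
              d.insert t (d.getD t 0 + 1))
            d)
        PySem.Dict.empty).getD (PySem.Int.mod (x : Int) (people.length : Int)) 0 =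
      pvF table people x := by
  have hmI : (0 : Int) < (people.length : Int) := by exact_mod_cast hm
  rw [pvCounts_eq table people _ hm (PySem.Int.mod_nonneg _ hmI) (PySem.Int.mod_lt _ hmI)]
  rw [pvF, pvRotIter_eq people (List.ne_nil_of_length_pos hm) x, pvCountMatches_eq]
  congr 1
  apply List.countP_congr
  intro j hj
  have hjn : j < table.length := List.mem_range.mp hj
  have hjm : j < people.length := lt_of_lt_of_le hjn hpre
  rw [pvIndex_eq people.length j x hm]
  have hrot : (people.rotate (x * (people.length - 1))).getD j 0 =
      people.getD ((j + x * (people.length - 1)) % people.length) 0 := by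
    rw [List.getD_eq_getElem _ _ (by rw [List.length_rotate]; exact hjm), List.getElem_rotate,
      List.getD_eq_getElem _ _ (Nat.mod_lt _ hm)]
  rw [hrot]
  simp only [beq_iff_eq]
  exact ⟨fun h => h.symm, fun h => h.symm⟩

-- the winning rotation, as B's slices
theorem pvNatRot_eq (b m : Nat) (hm : 0 < m) :
    b * (m - 1) % m = (m - b % m) % m := by
  rw [Nat.mul_mod, Nat.mod_eq_of_lt (show m - 1 < m by omega)]
  set r := b % m with hr
  have hrm : r < m := Nat.mod_lt _ hm
  by_cases h0 : r = 0
  · simp [h0, Nat.mod_self]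
  · have hr1 : 1 ≤ r := Nat.one_le_iff_ne_zero.mpr h0
    have h1 : r * (m - 1) = r * m - r := by rw [Nat.mul_sub, Nat.mul_one]
    have h3 : m ≤ r * m := Nat.le_mul_of_pos_left m hr1
    have h4 : r ≤ r * m := Nat.le_mul_of_pos_right r hm
    have e : r * (m - 1) = (m - r) + (r - 1) * m := by
      have h2 : (r - 1) * m = r * m - m := by rw [Nat.sub_mul, Nat.one_mul]
      omega
    rw [e, Nat.add_mul_mod_self_right]

-- ===== VERDICT (by name: the statement is the Claim_ definition above) =====
theorem getMaxArrangement_spec : Claim_equal_getMaxArrangement := by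
  unfold Claim_equal_getMaxArrangement
  intro table people _ hpre
  unfold Spec_getMaxArrangement
  unfold Pre_getMaxArrangement at hpre
  by_cases hm0 : people.length = 0
  · have ht : table = [] := List.eq_nil_of_length_eq_zero (by omega)
    have hp : people = [] := List.eq_nil_of_length_eq_zero hm0
    subst ht; subst hp
    rfl
  · have hm : 0 < people.length := Nat.pos_of_ne_zero hm0
    have hbeq : ((people.length : Int) == 0) = false := by
      simp [Int.natCast_eq_zero, hm0]
    unfold getMaxArrangement getMaxArrangement_alt
    simp only [hbeq, Bool.false_eq_true, if_false]
    rw [pvA_loop table people table.length, pvB_loop, pvBest_congr _ (pvF table people)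
      (fun x => pvScore_eq table people hm hpre x) table.length]
    set b := pvBest (pvF table people) table.length with hb
    rw [pvScore_eq table people hm hpre b]
    have hmod : PySem.Int.mod ((b : Nat) : Int) (people.length : Int) = ((b % people.length : Nat) : Int) :=
      PySem.Int.mod_natCast b people.length
    have hbm : b % people.length ≤ people.length := le_of_lt (Nat.mod_lt _ hm)
    have hcast : (people.length : Int) - ((b % people.length : Nat) : Int) =
        ((people.length - b % people.length : Nat) : Int) := by omega
    rw [hmod, hcast, PySem.List.slice_from people (by positivity),
      PySem.List.slice_to people (by positivity), Int.toNat_natCast]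
    have hrotA : pvRotForwards^[b] people =
        people.drop (people.length - b % people.length) ++
          people.take (people.length - b % people.length) := by
      rw [pvRotIter_eq people (List.ne_nil_of_length_pos hm) b, ← List.rotate_mod,
        pvNatRot_eq b people.length hm, List.rotate_mod,
        List.rotate_eq_drop_append_take (by omega)]
    rw [hrotA]
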